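-- pv_equiv track=rewrite | github.com/PennyLaneAI/pennylane | pennylane/circuit_drawer.py | to_superscript
-- ===== SOURCE A (Python) =====
-- def to_superscript(num):
--     """Convert the given number to a superscripted string."""
--     ret = str(num)
--     for old, new in {
--         "0": "⁰",
--         "1": "¹",
--         "2": "²",
--         "3": "³",
--         "4": "⁴",
--         "5": "⁵",
--         "6": "⁶",
--         "7": "⁷",
--         "8": "⁸",
--         "9": "⁹",
--     }.items():
--         ret = ret.replace(old, new)
--
--     return ret
-- ===== SOURCE B (Python) =====
-- SUPERSCRIPT_DIGITS = "⁰¹²³⁴⁵⁶⁷⁸⁹"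
--
--
-- def _sup(n):
--     """Superscript digits of a non-negative int, built arithmetically by divmod 10."""
--     return ("" if n < 10 else _sup(n // 10)) + SUPERSCRIPT_DIGITS[n % 10]
--
--
-- def to_superscript(num):
--     """Convert the given number to a superscripted string."""
--     return "-" + _sup(-num) if num < 0 else _sup(num)
-- ===== Notes on version B (the rewrite author's own statement) =====
-- stated objective: alternative
-- what changed: B never builds str(num) and substitutes characters; it extracts the digits arithmetically by recursive divmod-10 on |num| and emits the superscript character for each digit value directly, prepending '-' for negatives.
import Mathlib
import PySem

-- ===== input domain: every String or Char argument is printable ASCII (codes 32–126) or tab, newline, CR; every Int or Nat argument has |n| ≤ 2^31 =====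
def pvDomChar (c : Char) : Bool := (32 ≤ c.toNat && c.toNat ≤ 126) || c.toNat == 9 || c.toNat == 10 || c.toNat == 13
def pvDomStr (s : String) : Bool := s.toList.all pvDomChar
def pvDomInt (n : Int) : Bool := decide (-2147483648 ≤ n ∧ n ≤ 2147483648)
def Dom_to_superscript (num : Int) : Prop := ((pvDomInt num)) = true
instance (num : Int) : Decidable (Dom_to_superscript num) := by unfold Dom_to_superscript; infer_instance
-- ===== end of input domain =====

-- B never builds str(num): it extracts the digits arithmetically by recursive divmod-10
-- on |num| and emits the superscript character per digit value; objective: alternative.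

-- ===== PORT A =====
-- the .items() of A's literal dict, in insertion order
def supPairs : List (String × String) :=
  [("0", "⁰"), ("1", "¹"), ("2", "²"), ("3", "³"), ("4", "⁴"),
   ("5", "⁵"), ("6", "⁶"), ("7", "⁷"), ("8", "⁸"), ("9", "⁹")]

def to_superscript (num : Int) : String :=
  supPairs.foldl (fun ret p => PySem.Str.replace ret p.1 p.2) (PySem.Int.toStr num)

-- ===== PORT B =====
-- SUPERSCRIPT_DIGITS
def supChars : List Char := ("⁰¹²³⁴⁵⁶⁷⁸⁹" : String).toList

-- _sup(n): superscript digits of n ≥ 0 by recursive divmod 10; SUPERSCRIPT_DIGITS[n % 10]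
-- is always in range, so the getD default is never used
def supAux (n : Nat) : List Char :=
  (if h : n < 10 then [] else supAux (n / 10)) ++ [supChars.getD (n % 10) ' ']
decreasing_by exact Nat.div_lt_self (by omega) (by omega)

def to_superscript_alt (num : Int) : String :=
  if num < 0 then String.ofList ('-' :: supAux (-num).toNat)
  else String.ofList (supAux num.toNat)

-- ===== PRECONDITION & SPEC =====
def Spec_to_superscript (num : Int) (out : String) : Prop := out = to_superscript_alt num
instance (num : Int) (out : String) : Decidable (Spec_to_superscript num out) := by unfold Spec_to_superscript; infer_instance

-- ===== CLAIM (what is proved, stated in full; the proofs are below) =====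
def Claim_equal_to_superscript : Prop := ∀ (num : Int), Dom_to_superscript num → Spec_to_superscript num (to_superscript num)

-- ===== LEMMAS AND PROOFS =====

-- replace with a one-char pattern and one-char replacement is a character map
theorem replace_go_single (o n : Char) (l acc : List Char) (fuel : Nat)
    (h : l.length ≤ fuel) :
    PySem.Chars.replace.go [o] [n] fuel l acc
      = acc.reverse ++ l.map (fun c => if c = o then n else c) := by
  induction l generalizing fuel acc with
  | nil =>
      cases fuel with
      | zero => simp [PySem.Chars.replace.go]
      | succ f => simp [PySem.Chars.replace.go]
  | cons c t ih =>
      cases fuel with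
      | zero => simp at h
      | succ f =>
          simp only [PySem.Chars.replace.go]
          by_cases hc : c = o
          · subst hc
            have : List.isPrefixOf [c] (c :: t) = true := by
              simp [List.isPrefixOf]
            rw [if_pos this]
            have hd : List.drop [c].length (c :: t) = t := by simp
            rw [hd, ih _ f (by simpa using h)]
            simp
          · have : List.isPrefixOf [o] (c :: t) = false := by
              simp [List.isPrefixOf]
              intro h'; exact absurd h'.symm hc
            rw [if_neg (by simp [this])]
            rw [ih _ f (by simpa using h)]
            simp [hc]

theorem replace_single (o n : Char) (cs : List Char) :
    PySem.Chars.replace cs [o] [n] = cs.map (fun c => if c = o then n else c) := by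
  rw [PySem.Chars.replace]
  rw [if_neg (by simp)]
  exact (replace_go_single o n cs [] cs.length le_rfl).trans (by simp)

def charPairs : List (Char × Char) :=
  [('0','⁰'),('1','¹'),('2','²'),('3','³'),('4','⁴'),
   ('5','⁵'),('6','⁶'),('7','⁷'),('8','⁸'),('9','⁹')]

-- A's per-character substitution chain
def chainSub (c : Char) : Char :=
  List.foldl (fun x p => if x = p.1 then p.2 else x) c charPairs

-- A's foldl over string pairs, moved to char lists (each pattern/replacement is one char)
theorem foldl_str_replace (ps : List (Char × Char)) (s : String) :
    (List.foldl (fun r p => PySem.Str.replace r p.1 p.2) s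
        (ps.map (fun p => (String.ofList [p.1], String.ofList [p.2])))).toList
      = List.foldl (fun r p => PySem.Chars.replace r [p.1] [p.2]) s.toList ps := by
  induction ps generalizing s with
  | nil => simp
  | cons p t ih =>
      simp only [List.map_cons, List.foldl_cons]
      rw [ih]
      congr 1
      rw [PySem.Str.toList_replace, String.toList_ofList, String.toList_ofList]

-- a sequence of one-char replaces is one map of the folded substitution
theorem foldl_replace_map (ps : List (Char × Char)) (cs : List Char) :
    List.foldl (fun r p => PySem.Chars.replace r [p.1] [p.2]) cs ps
      = cs.map (fun c => List.foldl (fun x p => if x = p.1 then p.2 else x) c ps) := by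
  induction ps generalizing cs with
  | nil => simp
  | cons p t ih =>
      simp only [List.foldl_cons]
      rw [replace_single p.1 p.2 cs, ih, List.map_map]
      rfl

theorem supPairs_eq :
    supPairs = charPairs.map (fun p => (String.ofList [p.1], String.ofList [p.2])) := by
  decide

-- so A is a per-character map over str(num)
theorem to_superscript_toList (num : Int) :
    (to_superscript num).toList = (PySem.Int.toChars num).map chainSub := by
  show (List.foldl (fun r p => PySem.Str.replace r p.1 p.2) (PySem.Int.toStr num) supPairs).toList = _
  rw [supPairs_eq, foldl_str_replace, foldl_replace_map, PySem.Int.toList_toStr]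
  rfl

-- the recurrence Nat.toDigits 10 actually satisfies
def digitsChars (n : Nat) : List Char :=
  (if h : n < 10 then [] else digitsChars (n / 10)) ++ [Nat.digitChar (n % 10)]
decreasing_by exact Nat.div_lt_self (by omega) (by omega)

theorem toDigitsCore_acc (b f n : Nat) (l : List Char) :
    Nat.toDigitsCore b f n l = Nat.toDigitsCore b f n [] ++ l := by
  induction f generalizing n l with
  | zero => simp [Nat.toDigitsCore]
  | succ f ih =>
      simp only [Nat.toDigitsCore]
      by_cases h : n / b = 0
      · simp [h]
      · rw [if_neg h, if_neg h, ih (n / b), ih (n / b) [Nat.digitChar (n % b)]]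
        simp

theorem toDigitsCore_eq_digitsChars (f : Nat) : ∀ n : Nat, n < f →
    Nat.toDigitsCore 10 f n [] = digitsChars n := by
  induction f with
  | zero => intro n h; omega
  | succ f ih =>
      intro n h
      rw [digitsChars]
      simp only [Nat.toDigitsCore]
      by_cases h10 : n < 10
      · rw [if_pos (by omega), dif_pos h10, Nat.mod_eq_of_lt h10]
        simp
      · rw [if_neg (by omega), dif_neg h10,
            toDigitsCore_acc 10 f (n / 10) [Nat.digitChar (n % 10)],
            ih (n / 10) (by omega)]

theorem toDigits_eq_digitsChars (n : Nat) :
    Nat.toDigits 10 n = digitsChars n := by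
  rw [Nat.toDigits]
  exact toDigitsCore_eq_digitsChars (n + 1) n (by omega)

-- the chain on a decimal digit character is exactly B's table entry
theorem chainSub_digit (d : Nat) (hd : d < 10) :
    chainSub (Nat.digitChar d) = supChars.getD d ' ' := by
  interval_cases d <;> decide

-- B's recursion is the chain-map of the digit recursion
theorem map_digitsChars (n : Nat) :
    (digitsChars n).map chainSub = supAux n := by
  induction n using Nat.strong_induction_on with
  | _ n ih =>
      rw [digitsChars, supAux, List.map_append]
      by_cases h : n < 10
      · rw [dif_pos h, dif_pos h]
        simp [chainSub_digit (n % 10) (Nat.mod_lt n (by omega)) ]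
      · rw [dif_neg h, dif_neg h, ih (n / 10) (Nat.div_lt_self (by omega) (by omega))]
        simp [chainSub_digit (n % 10) (by omega)]

-- ===== VERDICT (by name: the statement is the Claim_ definition above) =====
theorem to_superscript_spec : Claim_equal_to_superscript := by
  intro num _
  unfold Spec_to_superscript to_superscript_alt
  apply String.toList_inj.mp
  rw [to_superscript_toList, PySem.Int.toChars]
  by_cases h : num < 0
  · rw [if_pos h, if_pos h, String.toList_ofList, List.map_cons]
    have h0 : chainSub '-' = '-' := by decide
    have hn : (-num).toNat = num.natAbs := by omega
    rw [hn, toDigits_eq_digitsChars, map_digitsChars, h0]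
  · rw [if_neg h, if_neg h, String.toList_ofList, toDigits_eq_digitsChars, map_digitsChars]
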